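-- pv_equiv track=rewrite | github.com/sai-pranathi-kothapalli/cg-livekit-backend | app/services/history_managed_llm_wrapper.py | _block_wrapup_at_decoder
-- ===== SOURCE A (Python) =====
-- WRAPUP_REPLACEMENT = "Let me ask you one more question."
--
-- WRAPUP_PHRASES = (
--     "thank you for your time",
--     "thanks for your time",
--     "that's all from my side",
--     "that is all from my side",
--     "that's all for today",
--     "that is all for today",
--     "we're done",
--     "we are done",
--     "we are done here",
--     "interview is over",
--     "interview is complete",
--     "that concludes",
--     "wish you all the best",
--     "all the best",
--     "good luck",
--     "best of luck",
--     "you may leave",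
--     "you can go now",
--     "that will be all",
--     "no more questions",
--     "that's all the questions",
--     "thank you, that's all",
-- )
--
-- def _block_wrapup_at_decoder(text: str) -> str:
--     """Strip wrap-up sentences and replace with a neutral continuation. Used at decoder level."""
--     if not text or not text.strip():
--         return text
--     lower = text.lower()
--     # Find earliest start of any wrap-up phrase
--     earliest = len(text)
--     for phrase in WRAPUP_PHRASES:
--         idx = lower.find(phrase)
--         if idx != -1:
--             # Truncate at sentence boundary before this phrase if possible
--             before = text[:idx]
--             last_period = before.rfind(".")
--             last_newline = before.rfind("\n")
--             cut = max(last_period, last_newline)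
--             if cut != -1:
--                 idx = cut + 1
--             earliest = min(earliest, idx)
--     if earliest == 0:
--         return WRAPUP_REPLACEMENT
--     if earliest < len(text):
--         out = text[:earliest].rstrip()
--         if not out.endswith(".") and not out.endswith("?"):
--             out += "."
--         return out + " " + WRAPUP_REPLACEMENT
--     return text
-- ===== SOURCE B (Python) =====
-- WRAPUP_REPLACEMENT = "Let me ask you one more question."
--
-- WRAPUP_PHRASES = (
--     "thank you for your time",
--     "thanks for your time",
--     "that's all from my side",
--     "that is all from my side",
--     "that's all for today",
--     "that is all for today",
--     "we're done",
--     "we are done",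
--     "we are done here",
--     "interview is over",
--     "interview is complete",
--     "that concludes",
--     "wish you all the best",
--     "all the best",
--     "good luck",
--     "best of luck",
--     "you may leave",
--     "you can go now",
--     "that will be all",
--     "no more questions",
--     "that's all the questions",
--     "thank you, that's all",
-- )
--
-- def _block_wrapup_at_decoder(text: str) -> str:
--     """Strip wrap-up sentences and replace with a neutral continuation. Used at decoder level."""
--     if not text or not text.strip():
--         return text
--     lower = text.lower()
--     hits = [i for i in (lower.find(p) for p in WRAPUP_PHRASES) if i != -1]
--     if not hits:
--         return text
--     raw = min(hits)
--     before = text[:raw]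
--     cut = max(before.rfind("."), before.rfind("\n"))
--     earliest = cut + 1 if cut != -1 else raw
--     if earliest == 0:
--         return WRAPUP_REPLACEMENT
--     out = text[:earliest].rstrip()
--     if not out.endswith(".") and not out.endswith("?"):
--         out += "."
--     return out + " " + WRAPUP_REPLACEMENT
-- ===== Notes on version B (the rewrite author's own statement) =====
-- stated objective: alternative
-- what changed: B hoists the sentence-boundary snap (rfind '.'/'\n' on text[:idx]) out of the phrase loop: it collects only raw find indices, takes their minimum, and snaps that single index once; correctness rests on the snap being monotone in the index.
import Mathlib
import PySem

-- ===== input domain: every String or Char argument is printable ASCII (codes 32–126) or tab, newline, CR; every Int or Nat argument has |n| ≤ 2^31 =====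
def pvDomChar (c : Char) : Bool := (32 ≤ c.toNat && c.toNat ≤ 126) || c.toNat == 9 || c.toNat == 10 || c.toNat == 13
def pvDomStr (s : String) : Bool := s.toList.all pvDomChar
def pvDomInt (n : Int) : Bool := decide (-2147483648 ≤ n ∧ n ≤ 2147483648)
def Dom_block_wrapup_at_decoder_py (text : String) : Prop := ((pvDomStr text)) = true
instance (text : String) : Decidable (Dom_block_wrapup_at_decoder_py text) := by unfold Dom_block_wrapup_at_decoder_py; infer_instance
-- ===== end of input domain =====

-- B hoists the per-phrase sentence-boundary snap out of the phrase loop: it takes the minimum raw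
-- find index of all matching phrases and snaps once (objective: alternative decomposition, same cost).

def pvWrapupReplacement : String := "Let me ask you one more question."

def pvWrapupPhrases : List String :=
  ["thank you for your time", "thanks for your time", "that's all from my side",
   "that is all from my side", "that's all for today", "that is all for today",
   "we're done", "we are done", "we are done here", "interview is over",
   "interview is complete", "that concludes", "wish you all the best",
   "all the best", "good luck", "best of luck", "you may leave",
   "you can go now", "that will be all", "no more questions",
   "that's all the questions", "thank you, that's all"]

-- shared line of both Pythons: snap index `idx` back to the sentence boundary in text[:idx]
-- (before.rfind("."), before.rfind("\n"), cut = max, idx = cut+1 if cut != -1 else idx)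
def pvSnap (text : String) (idx : Int) : Int :=
  let before := PySem.Str.slice text none (some idx)
  let cut := max (PySem.Str.rfind before ".") (PySem.Str.rfind before "\n")
  if cut ≠ -1 then cut + 1 else idx

-- shared tail of both Pythons: out = text[:earliest].rstrip(); ensure '.'/'?'; append replacement
def pvFinish (text : String) (earliest : Int) : String :=
  let out := PySem.Str.rstrip (PySem.Str.slice text none (some earliest))
  let out := if !(PySem.Str.endswith out ".") && !(PySem.Str.endswith out "?") then out ++ "." else out
  out ++ " " ++ pvWrapupReplacement

-- ===== PORT A =====
-- A's three final returns (earliest == 0 / earliest < len(text) / fall-through)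
def pvEndA (text : String) (earliest : Int) : String :=
  if earliest = 0 then pvWrapupReplacement
  else if earliest < PySem.Str.len text then pvFinish text earliest
  else text

def block_wrapup_at_decoder_py (text : String) : String :=
  if text = "" ∨ PySem.Str.strip text = "" then text
  else
    pvEndA text
      (pvWrapupPhrases.foldl
        (fun earliest phrase =>
          if PySem.Str.find (PySem.Str.lower text) phrase ≠ -1 then
            min earliest (pvSnap text (PySem.Str.find (PySem.Str.lower text) phrase))
          else earliest)
        (PySem.Str.len text))

-- ===== PORT B =====
-- B's two final returns (earliest == 0 / otherwise)
def pvEndB (text : String) (earliest : Int) : String :=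
  if earliest = 0 then pvWrapupReplacement else pvFinish text earliest

def block_wrapup_at_decoder_py_alt (text : String) : String :=
  if text = "" ∨ PySem.Str.strip text = "" then text
  else
    match (pvWrapupPhrases.map (fun phrase => PySem.Str.find (PySem.Str.lower text) phrase)).filter
        (fun i => i != -1) with
    | [] => text
    | h :: t => pvEndB text (pvSnap text (t.foldl min h))
      -- min(hits) on the nonempty hit list is the running minimum (PySem.List.min?_id_cons)

-- ===== PRECONDITION & SPEC =====
def Spec_block_wrapup_at_decoder_py (text : String) (out : String) : Prop := out = block_wrapup_at_decoder_py_alt text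
instance (text : String) (out : String) : Decidable (Spec_block_wrapup_at_decoder_py text out) := by unfold Spec_block_wrapup_at_decoder_py; infer_instance

-- ===== CLAIM (what is proved, stated in full; the proofs are below) =====
def Claim_equal_block_wrapup_at_decoder_py : Prop := ∀ (text : String), Dom_block_wrapup_at_decoder_py text → Spec_block_wrapup_at_decoder_py text (block_wrapup_at_decoder_py text)

-- ===== LEMMAS AND PROOFS =====

-- list-level snap: the boundary cut and the adjusted index, on text.toList
def pvCut (l : List Char) (i : Int) : Int :=
  max (PySem.Chars.rfind (l.take i.toNat) ['.']) (PySem.Chars.rfind (l.take i.toNat) ['\n'])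

def pvAdj (l : List Char) (i : Int) : Int :=
  if pvCut l i ≠ -1 then pvCut l i + 1 else i

-- a boundary character ('.' or '\n') at position k of l
def pvBd (l : List Char) (k : Nat) : Prop := l[k]? = some '.' ∨ l[k]? = some '\n'

theorem pvSnap_eq (text : String) (i : Int) (h : 0 ≤ i) :
    pvSnap text i = pvAdj text.toList i := by
  have hd : (".".toList) = ['.'] := rfl
  have hn : ("\n".toList) = ['\n'] := rfl
  simp [pvSnap, pvAdj, pvCut, PySem.Str.rfind_eq, PySem.Str.toList_slice,
    PySem.Chars.slice_eq_listSlice, PySem.List.slice_to _ h, hd, hn]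

-- [c] is a prefix of t iff t starts with c
theorem pvSinglePfx (c : Char) (t : List Char) :
    ([c].isPrefixOf t = true) ↔ t.head? = some c := by
  cases t with
  | nil => simp [List.isPrefixOf]
  | cons a t =>
    show (c == a && List.isPrefixOf ([] : List Char) t) = true ↔ (a :: t).head? = some c
    simp [List.isPrefixOf]
    exact eq_comm

-- definitional equations of rfind.go
theorem pvGoZero (s sub : List Char) :
    PySem.Chars.rfind.go s sub 0 = if sub.isPrefixOf s then 0 else -1 := rfl

theorem pvGoSucc (s sub : List Char) (j : Nat) :
    PySem.Chars.rfind.go s sub (j + 1) =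
      if sub.isPrefixOf (s.drop (j + 1)) then ((j + 1 : Nat) : Int)
      else PySem.Chars.rfind.go s sub j := rfl

-- full spec of rfind.go for a single-character needle
theorem pvRgoSpec (s : List Char) (c : Char) (j : Nat) :
    (PySem.Chars.rfind.go s [c] j = -1 ∧ ∀ k : Nat, k ≤ j → s[k]? ≠ some c) ∨
    (∃ m : Nat, PySem.Chars.rfind.go s [c] j = (m : Int) ∧ m ≤ j ∧ s[m]? = some c ∧
      ∀ k : Nat, m < k → k ≤ j → s[k]? ≠ some c) := by
  induction j with
  | zero =>
    by_cases h : [c].isPrefixOf s = true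
    · right
      refine ⟨0, ?_, le_refl _, ?_, ?_⟩
      · simp [pvGoZero, h]
      · have := (pvSinglePfx c s).mp h
        simpa [← List.head?_eq_getElem?] using this
      · intro k hk hk0; omega
    · left
      constructor
      · simp [pvGoZero, h]
      · intro k hk
        interval_cases k
        have := (pvSinglePfx c s).not.mp h
        simpa [← List.head?_eq_getElem?] using this
  | succ j ih =>
    by_cases h : [c].isPrefixOf (s.drop (j + 1)) = true
    · right
      refine ⟨j + 1, ?_, le_refl _, ?_, ?_⟩
      · simp [pvGoSucc, h]
      · have := (pvSinglePfx c _).mp h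
        simpa [List.head?_drop] using this
      · intro k hk hk'; omega
    · have hne : s[j + 1]? ≠ some c := by
        have := (pvSinglePfx c _).not.mp h
        simpa [List.head?_drop] using this
      have hg : PySem.Chars.rfind.go s [c] (j + 1) = PySem.Chars.rfind.go s [c] j := by
        simp [pvGoSucc, h]
      rcases ih with ⟨h1, h2⟩ | ⟨m, hm, hmj, hmc, hw⟩
      · left
        refine ⟨hg.trans h1, fun k hk => ?_⟩
        rcases Nat.lt_succ_iff_lt_or_eq.mp (Nat.lt_succ_of_le hk) with hk' | hk'
        · exact h2 k (by omega)
        · subst hk'; exact hne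
      · right
        refine ⟨m, hg.trans hm, by omega, hmc, fun k hk hk' => ?_⟩
        rcases Nat.lt_succ_iff_lt_or_eq.mp (Nat.lt_succ_of_le hk') with h' | h'
        · exact hw k hk (by omega)
        · subst h'; exact hne

theorem pvRfindNeg (s : List Char) (c : Char) (h : PySem.Chars.rfind s [c] = -1) :
    ∀ k : Nat, s[k]? ≠ some c := by
  intro k
  rcases pvRgoSpec s c s.length with ⟨_, h2⟩ | ⟨m, hm, _, _, _⟩
  · by_cases hk : k ≤ s.length
    · exact h2 k hk
    · simp [List.getElem?_eq_none (by omega : s.length ≤ k)]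
  · unfold PySem.Chars.rfind at h; rw [h] at hm; omega

theorem pvRfindPos (s : List Char) (c : Char) (h : PySem.Chars.rfind s [c] ≠ -1) :
    ∃ m : Nat, PySem.Chars.rfind s [c] = (m : Int) ∧ s[m]? = some c ∧
      ∀ k : Nat, m < k → s[k]? ≠ some c := by
  rcases pvRgoSpec s c s.length with ⟨h1, _⟩ | ⟨m, hm, _, hmc, hw⟩
  · exact absurd h1 (by unfold PySem.Chars.rfind at h; exact h)
  · refine ⟨m, hm, hmc, fun k hk => ?_⟩
    by_cases hk' : k ≤ s.length
    · exact hw k hk hk'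
    · simp [List.getElem?_eq_none (by omega : s.length ≤ k)]

theorem pvNegOneLeRfind (s : List Char) (c : Char) : -1 ≤ PySem.Chars.rfind s [c] := by
  rcases pvRgoSpec s c s.length with ⟨h1, _⟩ | ⟨m, hm, _, _, _⟩
  · unfold PySem.Chars.rfind; rw [h1]
  · unfold PySem.Chars.rfind; rw [hm]; omega

-- spec of the combined cut when neither boundary character occurs before i
theorem pvCutNeg (l : List Char) (i : Int) (h : pvCut l i = -1) :
    ∀ k : Nat, k < i.toNat → ¬ pvBd l k := by
  intro k hk
  have h1 : PySem.Chars.rfind (l.take i.toNat) ['.'] = -1 := by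
    have := pvNegOneLeRfind (l.take i.toNat) '.'
    have := le_max_left (PySem.Chars.rfind (l.take i.toNat) ['.']) (PySem.Chars.rfind (l.take i.toNat) ['\n'])
    unfold pvCut at h; omega
  have h2 : PySem.Chars.rfind (l.take i.toNat) ['\n'] = -1 := by
    have := pvNegOneLeRfind (l.take i.toNat) '\n'
    have := le_max_right (PySem.Chars.rfind (l.take i.toNat) ['.']) (PySem.Chars.rfind (l.take i.toNat) ['\n'])
    unfold pvCut at h; omega
  have g1 := pvRfindNeg _ _ h1 k
  have g2 := pvRfindNeg _ _ h2 k
  rw [List.getElem?_take, if_pos hk] at g1 g2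
  intro hb; rcases hb with hb | hb
  · exact g1 hb
  · exact g2 hb

-- joint spec of two rfinds when the larger one is a hit at c
theorem pvTwoRfind (b : List Char) (c d : Char)
    (hle : PySem.Chars.rfind b [d] ≤ PySem.Chars.rfind b [c])
    (hne : PySem.Chars.rfind b [c] ≠ -1) :
    ∃ m : Nat, PySem.Chars.rfind b [c] = (m : Int) ∧ b[m]? = some c ∧
      ∀ k : Nat, m < k → b[k]? ≠ some c ∧ b[k]? ≠ some d := by
  obtain ⟨m, hm, hmc, hw⟩ := pvRfindPos b c hne
  refine ⟨m, hm, hmc, fun k hk => ⟨hw k hk, ?_⟩⟩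
  by_cases hd : PySem.Chars.rfind b [d] = -1
  · exact pvRfindNeg b d hd k
  · obtain ⟨m', hm', _, hw'⟩ := pvRfindPos b d hd
    exact hw' k (by rw [hm] at hle; rw [hm'] at hle; omega)

-- spec of the combined cut when a boundary character occurs: its position, and no later one before i
theorem pvCutPos (l : List Char) (i : Int) (h : pvCut l i ≠ -1) :
    ∃ m : Nat, pvCut l i = (m : Int) ∧ m < i.toNat ∧ pvBd l m ∧
      ∀ k : Nat, m < k → k < i.toNat → ¬ pvBd l k := by
  have key : ∃ m : Nat, pvCut l i = (m : Int) ∧ (l.take i.toNat)[m]? ≠ none ∧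
      ((l.take i.toNat)[m]? = some '.' ∨ (l.take i.toNat)[m]? = some '\n') ∧
      ∀ k : Nat, m < k → (l.take i.toNat)[k]? ≠ some '.' ∧ (l.take i.toNat)[k]? ≠ some '\n' := by
    rcases le_total (PySem.Chars.rfind (l.take i.toNat) ['\n']) (PySem.Chars.rfind (l.take i.toNat) ['.']) with hle | hle
    · have hmax : pvCut l i = PySem.Chars.rfind (l.take i.toNat) ['.'] := max_eq_left hle
      obtain ⟨m, hm, hmc, hw⟩ := pvTwoRfind (l.take i.toNat) '.' '\n' hle (hmax ▸ h)
      exact ⟨m, hmax.trans hm, by simp [hmc], Or.inl hmc, hw⟩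
    · have hmax : pvCut l i = PySem.Chars.rfind (l.take i.toNat) ['\n'] := max_eq_right hle
      obtain ⟨m, hm, hmc, hw⟩ := pvTwoRfind (l.take i.toNat) '\n' '.' hle (hmax ▸ h)
      exact ⟨m, hmax.trans hm, by simp [hmc], Or.inr hmc, fun k hk => (hw k hk).symm.imp id id⟩
  obtain ⟨m, hm, hne, hbd, hw⟩ := key
  have hmlt : m < i.toNat := by
    by_contra hge
    exact hne (List.getElem?_eq_none (by simp; omega))
  refine ⟨m, hm, hmlt, ?_, ?_⟩
  · rw [List.getElem?_take, if_pos hmlt] at hbd; exact hbd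
  · intro k hk hk' hb
    have := hw k hk
    rw [List.getElem?_take, if_pos hk'] at this
    rcases hb with hb | hb
    · exact this.1 hb
    · exact this.2 hb

theorem pvAdj_le (l : List Char) (i : Int) (h : 0 ≤ i) : pvAdj l i ≤ i := by
  unfold pvAdj
  split_ifs with hc
  · obtain ⟨m, hm, hlt, _, _⟩ := pvCutPos l i hc
    omega
  · exact le_refl i

theorem pvAdj_mono (l : List Char) (i j : Int) (hi : 0 ≤ i) (hij : i ≤ j) :
    pvAdj l i ≤ pvAdj l j := by
  have htn : i.toNat ≤ j.toNat := Int.toNat_le_toNat hij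
  unfold pvAdj
  by_cases hci : pvCut l i = -1
  · by_cases hcj : pvCut l j = -1
    · simp [hci, hcj]; omega
    · obtain ⟨m, hm, hlt, hbd, _⟩ := pvCutPos l j hcj
      have him : i.toNat ≤ m := by
        by_contra hlt'
        exact pvCutNeg l i hci m (by omega) hbd
      simp [hci, hcj]
      omega
  · by_cases hcj : pvCut l j = -1
    · obtain ⟨m, hm, hlt, hbd, _⟩ := pvCutPos l i hci
      exact absurd hbd (pvCutNeg l j hcj m (by omega))
    · obtain ⟨m1, hm1, hlt1, hbd1, _⟩ := pvCutPos l i hci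
      obtain ⟨m2, hm2, hlt2, _, hw2⟩ := pvCutPos l j hcj
      have : m1 ≤ m2 := by
        by_contra hgt
        exact hw2 m1 (by omega) (by omega) hbd1
      simp [hci, hcj]
      omega

theorem pvAdj_min (l : List Char) (i j : Int) (hi : 0 ≤ i) (hj : 0 ≤ j) :
    pvAdj l (min i j) = min (pvAdj l i) (pvAdj l j) := by
  rcases le_total i j with h | h
  · have hm := pvAdj_mono l i j hi h
    rw [min_eq_left h, min_eq_left hm]
  · have hm := pvAdj_mono l j i hj h
    rw [min_eq_right h, min_eq_right hm]

-- the A-side fold over adjusted hits, with the accumulator pulled out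
theorem pvFoldMinAdj (l : List Char) :
    ∀ (t : List Int) (h e : Int), 0 ≤ h → (∀ x ∈ t, 0 ≤ x) →
      t.foldl (fun e i => min e (pvAdj l i)) (min e (pvAdj l h)) =
        min e (pvAdj l (t.foldl min h)) := by
  intro t
  induction t with
  | nil => intro h e _ _; rfl
  | cons x t' ih =>
    intro h e hh hx
    have hx0 : 0 ≤ x := hx x List.mem_cons_self
    have hmin : 0 ≤ min h x := le_min hh hx0
    calc
      (x :: t').foldl (fun e i => min e (pvAdj l i)) (min e (pvAdj l h))
          = t'.foldl (fun e i => min e (pvAdj l i)) (min (min e (pvAdj l h)) (pvAdj l x)) := rfl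
      _ = t'.foldl (fun e i => min e (pvAdj l i)) (min e (pvAdj l (min h x))) := by
            rw [min_assoc, ← pvAdj_min l h x hh hx0]
      _ = min e (pvAdj l (t'.foldl min (min h x))) :=
            ih (min h x) e hmin (fun y hy => hx y (List.mem_cons_of_mem _ hy))
      _ = min e (pvAdj l ((x :: t').foldl min h)) := rfl

-- every phrase is a nonempty string
theorem pvPhrases_ne : ∀ p ∈ pvWrapupPhrases, p.toList ≠ [] := by decide

-- every kept hit is a valid raw index: 0 ≤ i < len(text)
theorem pvHitRange (text : String) (i : Int)
    (hm : i ∈ (pvWrapupPhrases.map (fun phrase => PySem.Str.find (PySem.Str.lower text) phrase)).filter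
        (fun i => i != -1)) :
    0 ≤ i ∧ i < (text.toList.length : Int) := by
  rw [List.mem_filter] at hm
  obtain ⟨hmem, hne'⟩ := hm
  have hne : i ≠ -1 := by simpa using hne'
  rw [List.mem_map] at hmem
  obtain ⟨p, hp, hfind⟩ := hmem
  have hlow : (PySem.Str.lower text).toList = List.map PySem.Chars.lowerChar text.toList := by
    rw [PySem.Str.toList_lower, PySem.Chars.lower]
  have hf : i = PySem.Chars.find (PySem.Str.lower text).toList p.toList := by
    rw [← hfind, PySem.Str.find_eq]
  have hge : -1 ≤ i := hf ▸ PySem.Chars.neg_one_le_find _ _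
  have h0 : 0 ≤ i := by omega
  refine ⟨h0, ?_⟩
  have hftn : 0 ≤ PySem.Chars.find (PySem.Str.lower text).toList p.toList := hf ▸ h0
  obtain ⟨hpfx, _⟩ := PySem.Chars.find_spec hftn
  have hplen := pvPhrases_ne p hp
  have hdrop : (PySem.Str.lower text).toList.drop (PySem.Chars.find (PySem.Str.lower text).toList p.toList).toNat ≠ [] := by
    intro hnil
    rw [hnil, List.prefix_nil] at hpfx
    exact hplen hpfx
  have hlen : (PySem.Chars.find (PySem.Str.lower text).toList p.toList).toNat < (PySem.Str.lower text).toList.length := by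
    by_contra hge'
    exact hdrop (List.drop_eq_nil_of_le (by omega))
  have hlen' : (PySem.Str.lower text).toList.length = text.toList.length := by
    rw [hlow, List.length_map]
  omega

-- A's phrase loop equals: filter the raw hits, snap their minimum once
theorem pvFoldEq (text : String) :
    (pvWrapupPhrases.foldl
        (fun earliest phrase =>
          if PySem.Str.find (PySem.Str.lower text) phrase ≠ -1 then
            min earliest (pvSnap text (PySem.Str.find (PySem.Str.lower text) phrase))
          else earliest)
        (PySem.Str.len text)) =
    (match (pvWrapupPhrases.map (fun phrase => PySem.Str.find (PySem.Str.lower text) phrase)).filter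
        (fun i => i != -1) with
    | [] => PySem.Str.len text
    | h :: t => min (PySem.Str.len text) (pvAdj text.toList (t.foldl min h))) := by
  have hfun : (fun i : Int => i != -1) = (fun i : Int => decide (i ≠ -1)) := by
    funext i
    by_cases h : i = -1 <;> simp [h]
  have hfold :
      (pvWrapupPhrases.foldl
        (fun earliest phrase =>
          if PySem.Str.find (PySem.Str.lower text) phrase ≠ -1 then
            min earliest (pvSnap text (PySem.Str.find (PySem.Str.lower text) phrase))
          else earliest)
        (PySem.Str.len text)) =
      ((pvWrapupPhrases.map (fun phrase => PySem.Str.find (PySem.Str.lower text) phrase)).filter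
          (fun i => i != -1)).foldl
        (fun earliest i => min earliest (pvSnap text i)) (PySem.Str.len text) := by
    calc
      (pvWrapupPhrases.foldl
        (fun earliest phrase =>
          if PySem.Str.find (PySem.Str.lower text) phrase ≠ -1 then
            min earliest (pvSnap text (PySem.Str.find (PySem.Str.lower text) phrase))
          else earliest)
        (PySem.Str.len text))
          = ((pvWrapupPhrases.map (fun phrase => PySem.Str.find (PySem.Str.lower text) phrase)).foldl
              (fun earliest i => if i ≠ -1 then min earliest (pvSnap text i) else earliest)
              (PySem.Str.len text)) :=
            (List.foldl_map (f := fun phrase => PySem.Str.find (PySem.Str.lower text) phrase)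
              (g := fun earliest i => if i ≠ -1 then min earliest (pvSnap text i) else earliest)
              (l := pvWrapupPhrases) (init := PySem.Str.len text)).symm
      _ = ((pvWrapupPhrases.map (fun phrase => PySem.Str.find (PySem.Str.lower text) phrase)).filter
              (fun i : Int => decide (i ≠ -1))).foldl
            (fun earliest i => min earliest (pvSnap text i)) (PySem.Str.len text) :=
          PySem.List.foldl_ite_eq_foldl_filter (p := fun i : Int => i ≠ -1)
            (f := fun earliest i => min earliest (pvSnap text i)) _ _
      _ = ((pvWrapupPhrases.map (fun phrase => PySem.Str.find (PySem.Str.lower text) phrase)).filter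
              (fun i : Int => i != -1)).foldl
            (fun earliest i => min earliest (pvSnap text i)) (PySem.Str.len text) := by rw [hfun]
  rw [hfold]
  rcases hh : (pvWrapupPhrases.map (fun phrase => PySem.Str.find (PySem.Str.lower text) phrase)).filter
      (fun i => i != -1) with _ | ⟨h, t⟩
  · rfl
  · have hrange : ∀ x ∈ h :: t, 0 ≤ x ∧ x < (text.toList.length : Int) := by
      intro x hx; exact pvHitRange text x (by rw [hh]; exact hx)
    have hh0 : 0 ≤ h := (hrange h List.mem_cons_self).1
    have ht0 : ∀ x ∈ t, 0 ≤ x := fun x hx => (hrange x (List.mem_cons_of_mem _ hx)).1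
    show t.foldl (fun earliest i => min earliest (pvSnap text i))
        (min (PySem.Str.len text) (pvSnap text h)) =
      min (PySem.Str.len text) (pvAdj text.toList (t.foldl min h))
    have hcongr : t.foldl (fun earliest i => min earliest (pvSnap text i))
          (min (PySem.Str.len text) (pvSnap text h)) =
        t.foldl (fun earliest i => min earliest (pvAdj text.toList i))
          (min (PySem.Str.len text) (pvSnap text h)) := by
      apply PySem.List.foldl_congr_mem
      intro acc x hx
      rw [pvSnap_eq text x (ht0 x hx)]
    rw [hcongr, pvSnap_eq text h hh0,
      pvFoldMinAdj text.toList t h (PySem.Str.len text) hh0 ht0]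

-- main equivalence
theorem pvMain (text : String) :
    block_wrapup_at_decoder_py text = block_wrapup_at_decoder_py_alt text := by
  unfold block_wrapup_at_decoder_py block_wrapup_at_decoder_py_alt
  by_cases hg : text = "" ∨ PySem.Str.strip text = ""
  · rw [if_pos hg, if_pos hg]
  · rw [if_neg hg, if_neg hg, pvFoldEq]
    have hlen : PySem.Str.len text = (text.toList.length : Int) := PySem.Str.len_eq text
    have htne : text.toList ≠ [] := by
      simpa using (fun h => hg (Or.inl h) : text ≠ "")
    have hpos : 0 < text.toList.length := List.length_pos_of_ne_nil htne
    rcases hh : (pvWrapupPhrases.map (fun phrase => PySem.Str.find (PySem.Str.lower text) phrase)).filter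
        (fun i => i != -1) with _ | ⟨h, t⟩
    · -- no hits: earliest = len(text); A falls through to text
      show pvEndA text (PySem.Str.len text) = text
      unfold pvEndA
      rw [hlen, if_neg (by omega), if_neg (by omega)]
    · -- hits: A's earliest = snap(min hits) < len(text)
      show pvEndA text (min (PySem.Str.len text) (pvAdj text.toList (t.foldl min h))) =
        pvEndB text (pvSnap text (t.foldl min h))
      have hrange : ∀ x ∈ h :: t, 0 ≤ x ∧ x < (text.toList.length : Int) := by
        intro x hx; exact pvHitRange text x (by rw [hh]; exact hx)
      have hraw' : t.foldl min h ∈ h :: t := by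
        rcases PySem.List.foldl_min_mem t h with h' | h'
        · rw [h']; exact List.mem_cons_self
        · exact List.mem_cons_of_mem _ h'
      obtain ⟨hr0, hrlt⟩ := hrange _ hraw'
      have hadj_lt : pvAdj text.toList (t.foldl min h) < (text.toList.length : Int) :=
        lt_of_le_of_lt (pvAdj_le text.toList _ hr0) hrlt
      have hmin : min (PySem.Str.len text) (pvAdj text.toList (t.foldl min h)) =
          pvAdj text.toList (t.foldl min h) := by
        rw [hlen]; exact min_eq_right (le_of_lt hadj_lt)
      rw [hmin, pvSnap_eq text _ hr0]
      unfold pvEndA pvEndB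
      by_cases h0 : pvAdj text.toList (t.foldl min h) = 0
      · rw [if_pos h0, if_pos h0]
      · rw [if_neg h0, if_neg h0, if_pos (by rw [hlen]; exact hadj_lt)]

-- ===== VERDICT (by name: the statement is the Claim_ definition above) =====
theorem block_wrapup_at_decoder_py_spec : Claim_equal_block_wrapup_at_decoder_py := by
  intro text _
  unfold Spec_block_wrapup_at_decoder_py
  exact pvMain text
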